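-- pv_equiv track=rewrite | github.com/blakeyoung81/COMPSCI_Blake_Young_91r | transcend/helpers/synthesize_genomes.py | get_all_combinations
-- ===== SOURCE A (Python) =====
-- def get_all_combinations(parent): # Finds all possible combinations of alleles a parent can pass on to their offspring, assuming independen assortment.
-- 	if len(parent) == 1:
-- 		return [parent[0][0], parent[0][1]]
-- 	else:
-- 		genlist = []
-- 		for x in get_all_combinations(parent[1:]):
-- 			genlist.append(parent[0][0] + x)
-- 			genlist.append(parent[0][1] + x)
-- 		return genlist
-- ===== SOURCE B (Python) =====
-- def get_all_combinations(parent):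
--     if len(parent) == 1:
--         return [parent[0][0], parent[0][1]]
--     result = [parent[-1][0], parent[-1][1]]
--     for gene in reversed(parent[:-1]):
--         result = [allele + x for x in result for allele in (gene[0], gene[1])]
--     return result
-- ===== Notes on version B (the rewrite author's own statement) =====
-- stated objective: alternative
-- what changed: Replaces the recursion on the tail with an iterative accumulator: start from the last gene's two alleles and fold the remaining genes in reverse with a flat list comprehension, no recursion. Pre_ excludes only the empty list, on which both A (RecursionError) and B (IndexError) raise.
import Mathlib
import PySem

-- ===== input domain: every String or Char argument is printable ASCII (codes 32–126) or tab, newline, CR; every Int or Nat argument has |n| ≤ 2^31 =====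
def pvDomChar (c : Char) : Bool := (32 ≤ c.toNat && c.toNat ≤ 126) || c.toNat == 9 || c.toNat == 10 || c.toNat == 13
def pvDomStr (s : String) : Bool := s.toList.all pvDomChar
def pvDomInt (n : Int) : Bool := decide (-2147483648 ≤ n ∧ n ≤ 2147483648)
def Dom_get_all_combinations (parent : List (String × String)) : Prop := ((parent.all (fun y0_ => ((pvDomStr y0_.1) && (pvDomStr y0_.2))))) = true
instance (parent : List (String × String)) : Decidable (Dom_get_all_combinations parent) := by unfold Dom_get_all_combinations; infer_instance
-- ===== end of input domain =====

-- B replaces A's recursion with an iterative accumulator folded over the genes in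
-- reverse; same return value on every non-empty input (objective: alternative).

-- ===== PORT A =====
-- A: recursion on the tail; the for-loop appending two strings per element is a foldl.
def get_all_combinations (parent : List (String × String)) : List String :=
  match parent with
  | [] => []          -- A never returns here (infinite recursion); excluded by Pre_
  | [p] => [p.1, p.2]
  | p :: rest =>
      (get_all_combinations rest).foldl
        (fun genlist x => genlist ++ [p.1 ++ x, p.2 ++ x]) []

-- ===== PORT B =====
-- B: start from the last gene, fold the remaining genes in reverse; the list
-- comprehension [allele + x for x in result for allele in (g0, g1)] is a flatMap.
def get_all_combinations_alt (parent : List (String × String)) : List String :=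
  if parent.length = 1 then
    match parent with
    | p :: _ => [p.1, p.2]
    | [] => []
  else
    match parent.getLast? with
    | none => []      -- B raises IndexError here in Python; excluded by Pre_
    | some last =>
        (parent.dropLast.reverse).foldl
          (fun result gene => result.flatMap (fun x => [gene.1 ++ x, gene.2 ++ x]))
          [last.1, last.2]

-- ===== PRECONDITION & SPEC =====
-- Pre_ excludes only the empty list, on which A raises RecursionError (and B IndexError).
def Pre_get_all_combinations (parent : List (String × String)) : Prop := parent ≠ []
instance (parent : List (String × String)) : Decidable (Pre_get_all_combinations parent) := by
  unfold Pre_get_all_combinations; infer_instance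
def pvWitness_get_all_combinations : (List (String × String)) := [("A", "a"), ("B", "b")]

def Spec_get_all_combinations (parent : List (String × String)) (out : List String) : Prop := out = get_all_combinations_alt parent
instance (parent : List (String × String)) (out : List String) : Decidable (Spec_get_all_combinations parent out) := by unfold Spec_get_all_combinations; infer_instance

-- ===== CLAIM (what is proved, stated in full; the proofs are below) =====
def Claim_equal_get_all_combinations : Prop := ∀ (parent : List (String × String)), Dom_get_all_combinations parent → Pre_get_all_combinations parent → Spec_get_all_combinations parent (get_all_combinations parent)

-- ===== LEMMAS AND PROOFS =====

-- the common one-gene step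
def pvStep (g : String × String) (l : List String) : List String :=
  l.flatMap (fun x => [g.1 ++ x, g.2 ++ x])

theorem pv_foldl_flatMap (g : String × String) :
    ∀ (l acc : List String),
      l.foldl (fun genlist x => genlist ++ [g.1 ++ x, g.2 ++ x]) acc = acc ++ pvStep g l := by
  intro l
  induction l with
  | nil => intro acc; simp [pvStep]
  | cons x xs ih => intro acc; simp [List.foldl, ih, pvStep, List.flatMap_cons]

theorem pvA_cons (p : String × String) (rest : List (String × String)) (h : rest ≠ []) :
    get_all_combinations (p :: rest) = pvStep p (get_all_combinations rest) := by
  match rest, h with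
  | q :: rs, _ =>
    show ((get_all_combinations (q :: rs)).foldl _ []) = _
    simpa using pv_foldl_flatMap p (get_all_combinations (q :: rs)) []

theorem pvB_cons (p : String × String) (rest : List (String × String)) (h : rest ≠ []) :
    get_all_combinations_alt (p :: rest) = pvStep p (get_all_combinations_alt rest) := by
  match rest, h with
  | q :: rs, _ =>
    cases rs with
    | nil =>
        simp [get_all_combinations_alt, pvStep]
    | cons r rs' =>
        simp only [get_all_combinations_alt]
        rw [if_neg (by simp), if_neg (by simp)]
        have hgl : (p :: q :: r :: rs').getLast? = (q :: r :: rs').getLast? := by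
          simp [List.getLast?_cons_cons]
        rw [hgl]
        cases hlast : (q :: r :: rs').getLast? with
        | none => simp at hlast
        | some last =>
            have hdl : (p :: q :: r :: rs').dropLast = p :: (q :: r :: rs').dropLast := by
              simp [List.dropLast]
            rw [hdl, List.reverse_cons]
            simp [pvStep, List.foldl_append]

theorem pv_eq : ∀ (parent : List (String × String)), parent ≠ [] →
    get_all_combinations parent = get_all_combinations_alt parent := by
  intro parent
  induction parent with
  | nil => intro h; exact absurd rfl h
  | cons p rest ih =>
      intro _
      cases rest with
      | nil => simp [get_all_combinations, get_all_combinations_alt]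
      | cons q rs =>
          have hne : (q :: rs : List (String × String)) ≠ [] := by simp
          rw [pvA_cons p _ hne, pvB_cons p _ hne, ih hne]

-- ===== VERDICT (by name: the statement is the Claim_ definition above) =====
theorem get_all_combinations_spec : Claim_equal_get_all_combinations := by
  intro parent _ hpre
  exact pv_eq parent hpre
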